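-- pv_equiv track=rewrite | github.com/MrKirlew/TheePhone | backend/perception_engine.py | _detect_energy_level
-- ===== SOURCE A (Python) =====
-- def _detect_energy_level(text: str) -> str:
--     """Detect user's energy level"""
--     high_energy = ["excited", "energetic", "motivated", "ready", "let's go", "pumped", "!"]
--     low_energy = ["tired", "exhausted", "sleepy", "drained", "fatigue", "worn out", "need rest"]
--
--     text_lower = text.lower()
--
--     high_count = sum(1 for indicator in high_energy if indicator in text_lower)
--     low_count = sum(1 for indicator in low_energy if indicator in text_lower)
--
--     if high_count > low_count:
--         return "high"
--     elif low_count > high_count: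
--         return "low"
--     else:
--         return "normal"
-- ===== SOURCE B (Python) =====
-- _HIGH = ["excited", "energetic", "motivated", "ready", "let's go", "pumped", "!"]
-- _LOW = ["tired", "exhausted", "sleepy", "drained", "fatigue", "worn out", "need rest"]
--
-- def _detect_energy_level(text: str) -> str:
--     """Detect user's energy level by a single left-to-right scan over the text:
--     at each position, record which indicators start there (a set, so each
--     indicator is found at most once), then compare how many of each kind were found."""
--     t = text.lower()
--     found = set()
--     for i in range(len(t)):
--         for kw in _HIGH + _LOW:
--             if t.startswith(kw, i):
--                 found.add(kw)
--     hi = len([kw for kw in _HIGH if kw in found])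
--     lo = len([kw for kw in _LOW if kw in found])
--     if hi > lo:
--         return "high"
--     if lo > hi:
--         return "low"
--     return "normal"
-- ===== Notes on version B (the rewrite author's own statement) =====
-- stated objective: alternative
-- what changed: Instead of fourteen independent substring-membership tests summed into two counters, B does one left-to-right scan over the text, at each position recording in a set which indicators start there (multi-pattern matching driven by the text), and classifies from the set of found indicators.
import Mathlib
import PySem

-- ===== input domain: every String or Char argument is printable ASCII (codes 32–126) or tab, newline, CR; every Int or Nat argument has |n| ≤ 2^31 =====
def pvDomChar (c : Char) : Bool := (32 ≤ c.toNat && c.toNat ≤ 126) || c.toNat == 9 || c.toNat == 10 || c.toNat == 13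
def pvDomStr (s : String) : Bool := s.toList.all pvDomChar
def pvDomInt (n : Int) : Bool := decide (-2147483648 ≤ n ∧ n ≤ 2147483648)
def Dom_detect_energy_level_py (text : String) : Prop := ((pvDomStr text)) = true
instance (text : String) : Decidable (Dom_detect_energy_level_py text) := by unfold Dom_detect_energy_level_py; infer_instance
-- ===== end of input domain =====

-- B replaces A's per-keyword substring tests and two counters by a single left-to-right
-- scan over the text that records in a set which indicators start at each position
-- (alternative decomposition, same asymptotic cost).

-- ===== PORT A =====
def detect_energy_level_py (text : String) : String :=
  let high_energy : List String := ["excited", "energetic", "motivated", "ready", "let's go", "pumped", "!"]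
  let low_energy : List String := ["tired", "exhausted", "sleepy", "drained", "fatigue", "worn out", "need rest"]
  let text_lower := PySem.Str.lower text
  let high_count : Int := high_energy.foldl (fun acc ind => if PySem.Str.isIn ind text_lower then acc + 1 else acc) 0
  let low_count : Int := low_energy.foldl (fun acc ind => if PySem.Str.isIn ind text_lower then acc + 1 else acc) 0
  if high_count > low_count then "high"
  else if low_count > high_count then "low"
  else "normal"

-- ===== PORT B =====
def pvHigh : List String := ["excited", "energetic", "motivated", "ready", "let's go", "pumped", "!"]
def pvLow : List String := ["tired", "exhausted", "sleepy", "drained", "fatigue", "worn out", "need rest"]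

-- t.startswith(kw, i) with 0 ≤ i is exactly PySem.Chars.startswith (t.drop i) kw.toList
-- (Python's optional start argument clamps only negative starts, and i ranges over 0..len-1 here).
def detect_energy_level_py_alt (text : String) : String :=
  let t := (PySem.Str.lower text).toList
  let found : PySem.Set String :=
    (List.range t.length).foldl
      (fun f i =>
        (pvHigh ++ pvLow).foldl
          (fun f kw => if PySem.Chars.startswith (t.drop i) kw.toList then PySem.Set.add f kw else f) f)
      PySem.Set.empty
  let hi := (pvHigh.filter (fun kw => PySem.Set.contains found kw)).length
  let lo := (pvLow.filter (fun kw => PySem.Set.contains found kw)).length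
  if hi > lo then "high"
  else if lo > hi then "low"
  else "normal"

-- ===== PRECONDITION & SPEC =====
def Spec_detect_energy_level_py (text : String) (out : String) : Prop := out = detect_energy_level_py_alt text
instance (text : String) (out : String) : Decidable (Spec_detect_energy_level_py text out) := by unfold Spec_detect_energy_level_py; infer_instance

-- ===== CLAIM (what is proved, stated in full; the proofs are below) =====
def Claim_equal_detect_energy_level_py : Prop := ∀ (text : String), Dom_detect_energy_level_py text → Spec_detect_energy_level_py text (detect_energy_level_py text)

-- ===== LEMMAS AND PROOFS =====

-- membership in the inner fold: the set gains exactly the keywords whose test holds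
theorem pv_mem_inner (kws : List String) (P : String → Bool) (f : PySem.Set String) (x : String) :
    x ∈ kws.foldl (fun f kw => if P kw then PySem.Set.add f kw else f) f ↔
      x ∈ f ∨ (x ∈ kws ∧ P x = true) := by
  induction kws generalizing f with
  | nil => simp
  | cons k ks ih =>
    rw [List.foldl_cons]
    by_cases h : P k = true
    · rw [if_pos h, ih]
      simp only [PySem.Set.mem_add, List.mem_cons]
      constructor
      · rintro ((hx | rfl) | ⟨hm, hp⟩)
        · exact Or.inl hx
        · exact Or.inr ⟨Or.inl rfl, h⟩
        · exact Or.inr ⟨Or.inr hm, hp⟩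
      · rintro (hx | ⟨(rfl | hm), hp⟩)
        · exact Or.inl (Or.inl hx)
        · exact Or.inl (Or.inr rfl)
        · exact Or.inr ⟨hm, hp⟩
    · rw [if_neg h, ih]
      simp only [List.mem_cons]
      constructor
      · rintro (hx | ⟨hm, hp⟩)
        · exact Or.inl hx
        · exact Or.inr ⟨Or.inr hm, hp⟩
      · rintro (hx | ⟨(rfl | hm), hp⟩)
        · exact Or.inl hx
        · exact absurd hp h
        · exact Or.inr ⟨hm, hp⟩

-- membership in the outer fold over positions
theorem pv_mem_outer (kws : List String) (Q : Nat → String → Bool) (n : Nat) (x : String) :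
    x ∈ (List.range n).foldl
        (fun f i => kws.foldl (fun f kw => if Q i kw then PySem.Set.add f kw else f) f)
        PySem.Set.empty ↔
      x ∈ kws ∧ ∃ i < n, Q i x = true := by
  induction n with
  | zero => simp [PySem.Set.empty]
  | succ m ih =>
    rw [List.range_succ, List.foldl_append, List.foldl_cons, List.foldl_nil, pv_mem_inner, ih]
    constructor
    · rintro (⟨hm, i, hi, hq⟩ | ⟨hm, hq⟩)
      · exact ⟨hm, i, Nat.lt_succ_of_lt hi, hq⟩
      · exact ⟨hm, m, Nat.lt_succ_self m, hq⟩
    · rintro ⟨hm, i, hi, hq⟩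
      rcases Nat.lt_succ_iff_lt_or_eq.mp hi with h | rfl
      · exact Or.inl ⟨hm, i, h, hq⟩
      · exact Or.inr ⟨hm, hq⟩

-- a nonempty pattern occurs somewhere iff it is a prefix of some proper suffix
theorem pv_exists_start_iff (sub t : List Char) (hne : sub ≠ []) :
    (∃ i < t.length, PySem.Chars.startswith (List.drop i t) sub = true) ↔
      PySem.Chars.isIn sub t = true := by
  rw [← PySem.Chars.exists_prefix_drop_iff_isIn]
  constructor
  · rintro ⟨i, _, hs⟩
    exact ⟨i, (PySem.Chars.startswith_iff _ _).mp hs⟩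
  · rintro ⟨j, hp⟩
    have hdrop : List.drop j t ≠ [] := by
      intro h
      rw [h] at hp
      exact hne (List.prefix_nil.mp hp)
    have hj : j < t.length := by
      by_contra h
      exact hdrop (List.drop_eq_nil_of_le (Nat.le_of_not_lt h))
    exact ⟨j, hj, (PySem.Chars.startswith_iff _ _).mpr hp⟩

-- for every indicator kw, B's found-set test agrees with A's substring test
theorem pv_contains_eq (s : String) (kw : String) (hmem : kw ∈ pvHigh ++ pvLow)
    (hne : kw.toList ≠ []) :
    PySem.Set.contains
      ((List.range s.toList.length).foldl
        (fun f i =>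
          (pvHigh ++ pvLow).foldl
            (fun f kw => if PySem.Chars.startswith (s.toList.drop i) kw.toList then PySem.Set.add f kw else f) f)
        PySem.Set.empty) kw
      = PySem.Str.isIn kw s := by
  rw [Bool.eq_iff_iff, PySem.Set.contains_iff,
      pv_mem_outer (pvHigh ++ pvLow) (fun i kw => PySem.Chars.startswith (s.toList.drop i) kw.toList),
      PySem.Str.isIn_eq, ← pv_exists_start_iff kw.toList s.toList hne]
  exact ⟨fun h => h.2, fun h => ⟨hmem, h⟩⟩

theorem pv_all_nonempty : ∀ kw ∈ pvHigh ++ pvLow, kw.toList ≠ [] := by decide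

-- ===== VERDICT (by name: the statement is the Claim_ definition above) =====
theorem detect_energy_level_py_spec : Claim_equal_detect_energy_level_py := by
  intro text _
  unfold Spec_detect_energy_level_py detect_energy_level_py detect_energy_level_py_alt
  simp only []
  set s := PySem.Str.lower text with hs
  have hfilter : ∀ L : List String, (∀ kw ∈ L, kw ∈ pvHigh ++ pvLow) →
      (L.filter (fun kw => PySem.Set.contains
        ((List.range s.toList.length).foldl
          (fun f i =>
            (pvHigh ++ pvLow).foldl
              (fun f kw => if PySem.Chars.startswith (s.toList.drop i) kw.toList then PySem.Set.add f kw else f) f)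
          PySem.Set.empty) kw)).length
        = L.countP (fun kw => PySem.Str.isIn kw s) := by
    intro L hL
    rw [← List.countP_eq_length_filter]
    apply List.countP_congr
    intro kw hkw
    have hmem := hL kw hkw
    rw [pv_contains_eq s kw hmem (pv_all_nonempty kw hmem)]
  rw [PySem.List.foldl_if_add_one, PySem.List.foldl_if_add_one,
      hfilter pvHigh (fun kw h => List.mem_append_left _ h),
      hfilter pvLow (fun kw h => List.mem_append_right _ h)]
  have hhigh : (["excited", "energetic", "motivated", "ready", "let's go", "pumped", "!"] : List String) = pvHigh := rfl
  have hlow : (["tired", "exhausted", "sleepy", "drained", "fatigue", "worn out", "need rest"] : List String) = pvLow := rfl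
  rw [hhigh, hlow]
  set cH := pvHigh.countP (fun kw => PySem.Str.isIn kw s)
  set cL := pvLow.countP (fun kw => PySem.Str.isIn kw s)
  split_ifs with h1 h2 h3 h4 <;> first | rfl | (exfalso; omega)
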